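-- pv_equiv track=rewrite | github.com/aillear/AllOrNothing | 打表部分/check.py | is_fivefold
-- ===== SOURCE A (Python) =====
-- def is_fivefold(arr):
--     list = sorted(arr)
--     if len(list) < 5:
--         return 0
--     count = 1
--     for i in range(1, len(list)):
--         if list[i] == list[i - 1]:
--             count = count + 1
--         else:
--             count = 1
--         if count >= 5:
--             return 1
--     return 0
-- ===== SOURCE B (Python) =====
-- def is_fivefold(arr):
--     counts = {}
--     for x in arr:
--         c = counts.get(x, 0) + 1
--         if c >= 5:
--             return 1
--         counts[x] = c
--     return 0
-- ===== Notes on version B (the rewrite author's own statement) =====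
-- stated objective: alternative
-- what changed: Replaces sort-then-adjacent-run scan with a single unsorted pass over the input that maintains a hash map of occurrence counts and returns 1 as soon as any value's count reaches 5; no sorting and no adjacency/run logic at all.
import Mathlib
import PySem

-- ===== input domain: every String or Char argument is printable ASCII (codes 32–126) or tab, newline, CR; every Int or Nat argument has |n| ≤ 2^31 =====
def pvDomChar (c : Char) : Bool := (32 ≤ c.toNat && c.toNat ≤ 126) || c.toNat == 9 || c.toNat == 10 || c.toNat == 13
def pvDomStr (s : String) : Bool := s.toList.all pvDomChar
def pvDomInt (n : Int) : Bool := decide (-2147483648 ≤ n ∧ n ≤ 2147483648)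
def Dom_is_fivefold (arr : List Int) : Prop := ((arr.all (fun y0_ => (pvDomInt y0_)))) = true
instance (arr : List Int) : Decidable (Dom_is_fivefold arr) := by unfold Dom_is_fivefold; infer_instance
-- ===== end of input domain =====

-- B drops the sort entirely: one pass over the unsorted input with a hash map of
-- occurrence counts, returning 1 as soon as any value's count reaches 5; objective: alternative.

-- ===== PORT A =====
-- the 'for i in range(1, len(list))' loop with early 'return 1', as structural recursion on i
def isFivefoldLoopA (l : List Int) (i : Nat) (count : Int) : Int :=
  if i < l.length then
    let count := if PySem.List.pyGetD l (i : Int) 0 = PySem.List.pyGetD l ((i : Int) - 1) 0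
                 then count + 1 else 1
    if 5 ≤ count then 1 else isFivefoldLoopA l (i + 1) count
  else 0
termination_by l.length - i

def is_fivefold (arr : List Int) : Int :=
  let l := PySem.List.sorted arr (fun x => x) false
  if l.length < 5 then 0
  else isFivefoldLoopA l 1 1

-- ===== PORT B =====
-- the 'for x in arr' loop with early 'return 1', as structural recursion on the list,
-- carrying the counts dict
def isFivefoldLoopB : List Int → PySem.Dict Int Int → Int
  | [], _ => 0
  | x :: rest, counts =>
    let c := counts.getD x 0 + 1
    if 5 ≤ c then 1
    else isFivefoldLoopB rest (counts.insert x c)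

def is_fivefold_alt (arr : List Int) : Int :=
  isFivefoldLoopB arr PySem.Dict.empty

-- ===== PRECONDITION & SPEC =====
def Spec_is_fivefold (arr : List Int) (out : Int) : Prop := out = is_fivefold_alt arr
instance (arr : List Int) (out : Int) : Decidable (Spec_is_fivefold arr out) := by unfold Spec_is_fivefold; infer_instance

-- ===== CLAIM (what is proved, stated in full; the proofs are below) =====
def Claim_equal_is_fivefold : Prop := ∀ (arr : List Int), Dom_is_fivefold arr → Spec_is_fivefold arr (is_fivefold arr)

-- ===== LEMMAS AND PROOFS =====

lemma loopA_zero_or_one (l : List Int) : ∀ fuel i c, l.length - i ≤ fuel →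
    isFivefoldLoopA l i c = 0 ∨ isFivefoldLoopA l i c = 1 := by
  intro fuel
  induction fuel with
  | zero =>
    intro i c hf
    rw [isFivefoldLoopA]
    have : ¬ i < l.length := by omega
    simp [this]
  | succ m ih =>
    intro i c hf
    rw [isFivefoldLoopA]
    by_cases h : i < l.length
    · simp only [h, if_true]
      split_ifs with h5
      · right; rfl
      · exact ih (i + 1) _ (by omega)
      · right; rfl
      · exact ih (i + 1) _ (by omega)
    · simp [h]

-- monotonicity of the sorted list, in getD form
lemma sorted_getD_mono (arr : List Int) {a b : Nat} (hab : a ≤ b)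
    (hb : b < (PySem.List.sorted arr (fun x => x) false).length) :
    (PySem.List.sorted arr (fun x => x) false).getD a 0 ≤
      (PySem.List.sorted arr (fun x => x) false).getD b 0 := by
  have ha : a < (PySem.List.sorted arr (fun x => x) false).length := lt_of_le_of_lt hab hb
  rw [List.getD_eq_getElem _ _ ha, List.getD_eq_getElem _ _ hb]
  exact PySem.List.sorted_id_getElem_mono arr hab hb

-- A's loop invariant: count is the exact length of the run of equal values ending at i-1,
-- no run of five ends before i; then the loop returns 1 iff some offset-4 window is equal.
lemma loopA_eq_one_iff (arr : List Int) :
    ∀ fuel (i c : Nat),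
    (PySem.List.sorted arr (fun x => x) false).length - i ≤ fuel →
    1 ≤ i → i ≤ (PySem.List.sorted arr (fun x => x) false).length →
    1 ≤ c → c < 5 → c ≤ i →
    (∀ k : Nat, k + 1 < c →
      (PySem.List.sorted arr (fun x => x) false).getD (i - 1 - k) 0 =
        (PySem.List.sorted arr (fun x => x) false).getD (i - 2 - k) 0) →
    (c = i ∨ (PySem.List.sorted arr (fun x => x) false).getD (i - c) 0 ≠
        (PySem.List.sorted arr (fun x => x) false).getD (i - c - 1) 0) →
    (∀ j : Nat, j + 4 < i →
      (PySem.List.sorted arr (fun x => x) false).getD j 0 ≠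
        (PySem.List.sorted arr (fun x => x) false).getD (j + 4) 0) →
    (isFivefoldLoopA (PySem.List.sorted arr (fun x => x) false) i (c : Int) = 1 ↔
      ∃ j : Nat, j + 4 < (PySem.List.sorted arr (fun x => x) false).length ∧
        (PySem.List.sorted arr (fun x => x) false).getD j 0 =
          (PySem.List.sorted arr (fun x => x) false).getD (j + 4) 0) := by
  intro fuel
  set l := PySem.List.sorted arr (fun x => x) false with hl
  induction fuel with
  | zero =>
    intro i c hf hi1 hil hc1 hc5 hci hrun hmax hpast
    rw [isFivefoldLoopA]
    have h : ¬ i < l.length := by omega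
    simp only [h, if_false]
    constructor
    · intro h0; omega
    · rintro ⟨j, hjl, hj⟩
      exact absurd hj (hpast j (by omega))
  | succ m ih =>
    intro i c hf hi1 hil hc1 hc5 hci hrun hmax hpast
    rw [isFivefoldLoopA]
    by_cases h : i < l.length
    · simp only [h, if_true]
      have hi1c : ((i : Int) - 1) = ((i - 1 : Nat) : Int) := by omega
      rw [hi1c, PySem.List.pyGetD_natCast, PySem.List.pyGetD_natCast]
      by_cases he : l.getD i 0 = l.getD (i - 1) 0
      · simp only [he, if_true]
        by_cases h5 : (5 : Int) ≤ (c : Int) + 1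
        · -- count reached 5: c = 4 and a window ends at i
          simp only [h5, if_true]
          have hc4 : c = 4 := by omega
          subst hc4
          obtain ⟨n, rfl⟩ : ∃ n, i = n + 4 := ⟨i - 4, by omega⟩
          constructor
          · intro _
            refine ⟨n, by omega, ?_⟩
            have e1 : l.getD (n + 3) 0 = l.getD (n + 2) 0 := by
              have := hrun 0 (by omega); simpa using this
            have e2 : l.getD (n + 2) 0 = l.getD (n + 1) 0 := by
              have := hrun 1 (by omega); simpa using this
            have e3 : l.getD (n + 1) 0 = l.getD n 0 := by
              have := hrun 2 (by omega); simpa using this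
            have e4 : l.getD (n + 4) 0 = l.getD (n + 3) 0 := by simpa using he
            omega
          · intro _; trivial
        · -- count c+1 < 5: recurse
          simp only [h5, if_false]
          have hcast : ((c : Int) + 1) = ((c + 1 : Nat) : Int) := by push_cast; ring
          rw [hcast]
          apply ih (i + 1) (c + 1) (by omega) (by omega) (by omega) (by omega)
            (by omega) (by omega)
          · -- run invariant
            intro k hk
            rcases Nat.eq_zero_or_pos k with rfl | hk0
            · simpa using he
            · have := hrun (k - 1) (by omega)
              have e1 : i + 1 - 1 - k = i - 1 - (k - 1) := by omega
              have e2 : i + 1 - 2 - k = i - 2 - (k - 1) := by omega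
              rw [e1, e2]; exact this
          · -- maximality invariant
            rcases hmax with hci' | hne
            · left; omega
            · right
              have e1 : i + 1 - (c + 1) = i - c := by omega
              rw [e1]; exact hne
          · -- no window ends before i+1
            intro j hj
            rcases Nat.lt_or_ge (j + 4) i with hlt | hge
            · exact hpast j hlt
            · -- j + 4 = i: a window ending at i would force a break inside the current run
              have hji : j + 4 = i := by omega
              intro hwin
              have hmono1 : l.getD j 0 ≤ l.getD (i - c - 1) 0 := by
                rw [hl]; exact sorted_getD_mono arr (by omega) (by rw [← hl]; omega)
              have hmono2 : l.getD (i - c - 1) 0 ≤ l.getD (i - c) 0 := by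
                rw [hl]; exact sorted_getD_mono arr (by omega) (by rw [← hl]; omega)
              have hmono3 : l.getD (i - c) 0 ≤ l.getD (j + 4) 0 := by
                rw [hl]; exact sorted_getD_mono arr (by omega) (by rw [← hl]; omega)
              rcases hmax with hci' | hne
              · omega
              · exact hne (by omega)
      · -- values differ: count resets to 1
        simp only [he, if_false]
        have h5 : ¬ (5 : Int) ≤ (1 : Int) := by omega
        simp only [h5, if_false]
        have hone : (1 : Int) = ((1 : Nat) : Int) := by norm_num
        rw [hone]
        apply ih (i + 1) 1 (by omega) (by omega) (by omega) (by omega) (by omega) (by omega)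
        · intro k hk; omega
        · right
          have e1 : i + 1 - 1 = i := by omega
          rw [e1]; exact he
        · intro j hj
          rcases Nat.lt_or_ge (j + 4) i with hlt | hge
          · exact hpast j hlt
          · have hji : j + 4 = i := by omega
            intro hwin
            have hmono1 : l.getD j 0 ≤ l.getD (i - 1) 0 := by
              rw [hl]; exact sorted_getD_mono arr (by omega) (by rw [← hl]; omega)
            have hmono2 : l.getD (i - 1) 0 ≤ l.getD i 0 := by
              rw [hl]; exact sorted_getD_mono arr (by omega) (by rw [← hl]; omega)
            have hmono3 : l.getD i 0 ≤ l.getD (j + 4) 0 := by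
              rw [hl]; exact sorted_getD_mono arr (by omega) (by rw [← hl]; omega)
            exact he (by omega)
    · simp only [h, if_false]
      constructor
      · intro h0; omega
      · rintro ⟨j, hjl, hj⟩
        exact absurd hj (hpast j (by omega))

lemma loopB_zero_or_one : ∀ (rest : List Int) (d : PySem.Dict Int Int),
    isFivefoldLoopB rest d = 0 ∨ isFivefoldLoopB rest d = 1 := by
  intro rest
  induction rest with
  | nil => intro d; left; rfl
  | cons x t ih =>
    intro d
    rw [isFivefoldLoopB]
    split_ifs with h5
    · right; rfl
    · exact ih _

-- B's loop invariant: the dict holds the count of each value seen so far, all below 5;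
-- the loop returns 1 iff some value's stored count plus its remaining occurrences reaches 5.
lemma loopB_eq_one_iff : ∀ (rest : List Int) (d : PySem.Dict Int Int),
    (∀ v, 0 ≤ d.getD v 0) → (∀ v, d.getD v 0 < 5) →
    (isFivefoldLoopB rest d = 1 ↔ ∃ v, 5 ≤ d.getD v 0 + (rest.count v : Int)) := by
  intro rest
  induction rest with
  | nil =>
    intro d hnn hlt
    simp only [isFivefoldLoopB]
    constructor
    · intro h; exact absurd h (by norm_num)
    · rintro ⟨v, hv⟩
      have := hlt v
      simp only [List.count_nil] at hv
      omega
  | cons x t ih =>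
    intro d hnn hlt
    rw [isFivefoldLoopB]
    by_cases h5 : (5 : Int) ≤ d.getD x 0 + 1
    · simp only [h5, if_true]
      constructor
      · intro _
        refine ⟨x, ?_⟩
        have hc : 1 ≤ ((x :: t).count x : Int) := by
          have : 1 ≤ (x :: t).count x := by
            simp [List.count_cons_self]
          exact_mod_cast this
        omega
      · intro _; trivial
    · simp only [h5, if_false]
      have hgd : ∀ v, (d.insert x (d.getD x 0 + 1)).getD v 0 =
          if v = x then d.getD x 0 + 1 else d.getD v 0 := by
        intro v; exact PySem.Dict.getD_insert d x v (d.getD x 0 + 1) 0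
      rw [ih (d.insert x (d.getD x 0 + 1))
            (fun v => by rw [hgd v]; split_ifs with hv
                         · have := hnn x; omega
                         · exact hnn v)
            (fun v => by rw [hgd v]; split_ifs with hv
                         · omega
                         · exact hlt v)]
      constructor
      · rintro ⟨v, hv⟩
        refine ⟨v, ?_⟩
        rw [hgd v] at hv
        by_cases hvx : v = x
        · subst hvx
          simp only [if_true, List.count_cons_self] at hv ⊢
          omega
        · simp only [hvx, if_false] at hv
          have hxv : ¬ (x = v) := fun h => hvx h.symm
          simp only [List.count_cons, hxv, beq_iff_eq, if_false]
          omega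
      · rintro ⟨v, hv⟩
        refine ⟨v, ?_⟩
        rw [hgd v]
        by_cases hvx : v = x
        · subst hvx
          simp only [if_true]
          rw [List.count_cons_self] at hv
          push_cast at hv
          omega
        · simp only [hvx, if_false]
          have hxv : ¬ (x = v) := fun h => hvx h.symm
          simp only [List.count_cons, hxv, beq_iff_eq, if_false] at hv
          omega

-- Bridge: in the sorted list, an offset-4 equal window exists iff some value occurs ≥ 5 times.
lemma window_iff_count (arr : List Int) :
    (∃ j : Nat, j + 4 < (PySem.List.sorted arr (fun x => x) false).length ∧
      (PySem.List.sorted arr (fun x => x) false).getD j 0 =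
        (PySem.List.sorted arr (fun x => x) false).getD (j + 4) 0) ↔
    (∃ v : Int, 5 ≤ (PySem.List.sorted arr (fun x => x) false).count v) := by
  set l := PySem.List.sorted arr (fun x => x) false with hl
  constructor
  · rintro ⟨j, hjl, hj⟩
    have hjlt : j < l.length := by omega
    refine ⟨l[j], ?_⟩
    -- the five entries l[j..j+4] are all equal to l[j]
    have hwin : l.getD j 0 = l.getD (j + 4) 0 := hj
    rw [List.getD_eq_getElem _ _ hjlt, List.getD_eq_getElem _ _ (by omega : j + 4 < l.length)] at hwin
    have hrep : (l.drop j).take 5 = List.replicate 5 l[j] := by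
      refine List.eq_replicate_iff.mpr ⟨by simp only [List.length_take, List.length_drop]; omega, ?_⟩
      intro b hb
      rw [List.mem_iff_getElem] at hb
      obtain ⟨k, hk, hbk⟩ := hb
      have hk5 : k < 5 := by
        have := hk; simp only [List.length_take, List.length_drop] at this; omega
      have hkd : k < (l.drop j).length := by
        simp only [List.length_drop]; omega
      rw [List.getElem_take, List.getElem_drop] at hbk
      have h1 : l[j] ≤ l[j + k] :=
        PySem.List.sorted_id_getElem_mono arr (by omega) (by simp only [← hl]; omega)
      have h2 : l[j + k] ≤ l[j + 4] :=
        PySem.List.sorted_id_getElem_mono arr (by omega) (by simp only [← hl]; omega)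
      rw [← hbk]
      omega
    have hsub : List.Sublist ((l.drop j).take 5) l :=
      ((l.drop j).take_sublist 5).trans (l.drop_sublist j)
    have hcount : ((l.drop j).take 5).count l[j] ≤ l.count l[j] :=
      hsub.count_le _
    rw [hrep, List.count_replicate_self] at hcount
    exact hcount
  · rintro ⟨v, hv⟩
    have hsub : List.Sublist (List.replicate 5 v) l := List.replicate_sublist_iff.mpr hv
    rw [List.sublist_iff_exists_fin_orderEmbedding_get_eq] at hsub
    obtain ⟨f, hf⟩ := hsub
    have hlen : (List.replicate 5 v).length = 5 := List.length_replicate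
    have hmono := f.strictMono
    -- the five image indices are strictly increasing naturals
    have h01 : (f (⟨0, by omega⟩ : Fin (List.replicate 5 v).length)).val <
        (f (⟨1, by omega⟩ : Fin (List.replicate 5 v).length)).val := by
      exact_mod_cast hmono (by simp)
    have h12 : (f (⟨1, by omega⟩ : Fin (List.replicate 5 v).length)).val <
        (f (⟨2, by omega⟩ : Fin (List.replicate 5 v).length)).val := by
      exact_mod_cast hmono (by simp)
    have h23 : (f (⟨2, by omega⟩ : Fin (List.replicate 5 v).length)).val <
        (f (⟨3, by omega⟩ : Fin (List.replicate 5 v).length)).val := by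
      exact_mod_cast hmono (by simp)
    have h34 : (f (⟨3, by omega⟩ : Fin (List.replicate 5 v).length)).val <
        (f (⟨4, by omega⟩ : Fin (List.replicate 5 v).length)).val := by
      exact_mod_cast hmono (by simp)
    set j0 := (f (⟨0, by omega⟩ : Fin (List.replicate 5 v).length)).val with hj0
    set j4 := (f (⟨4, by omega⟩ : Fin (List.replicate 5 v).length)).val with hj4
    have hj4lt : j4 < l.length := (f _).isLt
    have hj0v : l[j0]'(by omega) = v := by
      have := hf (⟨0, by omega⟩ : Fin (List.replicate 5 v).length)
      simp only [List.get_eq_getElem, List.getElem_replicate] at this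
      exact this.symm
    have hj4v : l[j4]'(by omega) = v := by
      have := hf (⟨4, by omega⟩ : Fin (List.replicate 5 v).length)
      simp only [List.get_eq_getElem, List.getElem_replicate] at this
      exact this.symm
    refine ⟨j0, by omega, ?_⟩
    rw [List.getD_eq_getElem _ _ (by omega : j0 < l.length),
        List.getD_eq_getElem _ _ (by omega : j0 + 4 < l.length)]
    have h1 : l[j0]'(by omega) ≤ l[j0 + 4]'(by omega) :=
      PySem.List.sorted_id_getElem_mono arr (by omega) (by simp only [← hl]; omega)
    have h2 : l[j0 + 4]'(by omega) ≤ l[j4]'(by omega) :=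
      PySem.List.sorted_id_getElem_mono arr (by omega) (by simp only [← hl]; omega)
    omega

-- counts in the sorted list are counts in the input
lemma count_sorted (arr : List Int) (v : Int) :
    (PySem.List.sorted arr (fun x => x) false).count v = arr.count v :=
  (PySem.List.sorted_perm arr (fun x => x) false).count_eq v

lemma empty_getD (v : Int) : (PySem.Dict.empty : PySem.Dict Int Int).getD v 0 = 0 := by
  simp [PySem.Dict.getD, PySem.Dict.get?, PySem.Dict.empty]

-- ===== VERDICT (by name: the statement is the Claim_ definition above) =====
theorem is_fivefold_spec : Claim_equal_is_fivefold := by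
  intro arr _
  unfold Spec_is_fivefold is_fivefold is_fivefold_alt
  set l := PySem.List.sorted arr (fun x => x) false with hl
  have hB := loopB_eq_one_iff arr PySem.Dict.empty
    (fun v => by rw [empty_getD]) (fun v => by rw [empty_getD]; omega)
  have hBiff : isFivefoldLoopB arr PySem.Dict.empty = 1 ↔ ∃ v, 5 ≤ arr.count v := by
    rw [hB]
    constructor
    · rintro ⟨v, hv⟩
      rw [empty_getD] at hv
      refine ⟨v, ?_⟩
      have h' : (5 : Int) ≤ (arr.count v : Int) := by omega
      exact_mod_cast h'
    · rintro ⟨v, hv⟩; exact ⟨v, by rw [empty_getD]; omega⟩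
  have hcnt : (∃ v : Int, 5 ≤ l.count v) ↔ ∃ v : Int, 5 ≤ arr.count v := by
    constructor
    · rintro ⟨v, hv⟩; rw [hl, count_sorted] at hv; exact ⟨v, hv⟩
    · rintro ⟨v, hv⟩; refine ⟨v, ?_⟩; rw [hl, count_sorted]; exact hv
  by_cases hlen : l.length < 5
  · simp only [hlen, if_true]
    rcases loopB_zero_or_one arr PySem.Dict.empty with h0 | h1
    · rw [h0]
    · exfalso
      obtain ⟨v, hv⟩ := hBiff.mp h1
      have hle : arr.count v ≤ arr.length := List.count_le_length
      have : arr.length = l.length := (PySem.List.sorted_perm arr (fun x => x) false).length_eq.symm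
      omega
  · simp only [hlen, if_false]
    have hA := loopA_eq_one_iff arr l.length 1 1 (by rw [← hl]; omega)
      (le_refl 1) (by rw [← hl]; omega) (le_refl 1) (by omega) (le_refl 1)
      (fun k hk => absurd hk (by omega)) (Or.inl rfl) (fun j hj => absurd hj (by omega))
    rw [show ((1 : Nat) : Int) = (1 : Int) by norm_num] at hA
    rw [← hl] at hA
    have hAiff : isFivefoldLoopA l 1 1 = 1 ↔ ∃ v, 5 ≤ arr.count v := by
      rw [hA, ← hcnt]; exact window_iff_count arr
    by_cases hw : ∃ v : Int, 5 ≤ arr.count v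
    · rw [hAiff.mpr hw, hBiff.mpr hw]
    · have hA0 : isFivefoldLoopA l 1 1 = 0 := by
        rcases loopA_zero_or_one l l.length 1 1 (by omega) with h0 | h1
        · exact h0
        · exact absurd (hAiff.mp h1) hw
      have hB0 : isFivefoldLoopB arr PySem.Dict.empty = 0 := by
        rcases loopB_zero_or_one arr PySem.Dict.empty with h0 | h1
        · exact h0
        · exact absurd (hBiff.mp h1) hw
      rw [hA0, hB0]
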